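-- pv_equiv track=rewrite | github.com/olgaObnosova/EGE_4 | 19-21/дж4.py | f
-- ===== SOURCE A (Python) =====
-- def f(a, h, ph):
--     if a  == 1:
--         return h % 2 == ph % 2
--     elif h == ph:
--         return 0
--     pos = [f(a //2+1,  h + 1, ph),f(a //2,  h + 1, ph),\
--            f(a //2+2,  h + 1, ph)]
--
--     return any(pos) if (h + 1) % 2 == ph % 2 else all(pos)
-- ===== SOURCE B (Python) =====
-- def f(a, h, ph):
--     # Level-by-level dynamic programming: the values reachable at each depth
--     # form a small interval, so one row per level replaces the 3-way recursion.
--     if a == 1: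
--         return h % 2 == ph % 2
--     if h == ph:
--         return False
--     def row(lo, hi, hd):
--         # dict mapping each x in [lo, hi] to the game value at depth hd
--         if hd == ph:
--             return {x: x == 1 for x in range(lo, hi + 1)}
--         prev = row(lo // 2, hi // 2 + 2, hd + 1)
--         vals = {}
--         for x in range(lo, hi + 1):
--             if x == 1:
--                 vals[x] = hd % 2 == ph % 2
--             else:
--                 c1 = prev[x // 2 + 1]
--                 c2 = prev[x // 2]
--                 c3 = prev[x // 2 + 2]
--                 if (hd + 1) % 2 == ph % 2:
--                     vals[x] = c1 or c2 or c3
--                 else: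
--                     vals[x] = c1 and c2 and c3
--         return vals
--     return row(a, a, h)[a]
-- ===== Notes on version B (the rewrite author's own statement) =====
-- stated objective: faster
-- what changed: Replaces the 3-way exponential recursion by a level-by-level dynamic program: the positions reachable at each depth form one small integer interval, so one row of a handful of values per level is computed from the row below instead of 3^(ph-h) recursive calls.
-- outside the precondition, e.g. on f(0, 0, 0): A returns 0, B returns False
import Mathlib
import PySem

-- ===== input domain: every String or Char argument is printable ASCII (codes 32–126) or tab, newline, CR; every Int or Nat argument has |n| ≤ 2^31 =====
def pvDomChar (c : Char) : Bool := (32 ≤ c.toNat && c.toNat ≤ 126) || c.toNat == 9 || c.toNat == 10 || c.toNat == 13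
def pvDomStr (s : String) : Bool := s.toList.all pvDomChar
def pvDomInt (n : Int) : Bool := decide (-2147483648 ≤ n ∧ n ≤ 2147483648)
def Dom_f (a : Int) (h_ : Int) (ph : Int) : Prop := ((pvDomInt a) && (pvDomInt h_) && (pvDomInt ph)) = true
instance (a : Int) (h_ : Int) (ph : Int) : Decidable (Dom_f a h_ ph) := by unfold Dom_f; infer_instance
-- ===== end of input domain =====

-- B replaces A's 3-way exponential recursion by one DP row per level (the reachable
-- positions at each depth form a small interval); return values agree on all of Pre_f.

-- ===== PORT A =====
-- Literal port of A. The 'ph < h_' branch is a totality guard only: there the Python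
-- recurses forever (RecursionError), and such inputs are excluded by Pre_f.
def f (a : Int) (h_ : Int) (ph : Int) : Bool :=
  if a = 1 then decide (PySem.Int.mod h_ 2 = PySem.Int.mod ph 2)
  else if h_ = ph then false
  else if ph < h_ then false
  else
    let p1 := f (PySem.Int.floordiv a 2 + 1) (h_ + 1) ph
    let p2 := f (PySem.Int.floordiv a 2) (h_ + 1) ph
    let p3 := f (PySem.Int.floordiv a 2 + 2) (h_ + 1) ph
    if PySem.Int.mod (h_ + 1) 2 = PySem.Int.mod ph 2 then p1 || p2 || p3
    else p1 && p2 && p3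
termination_by (ph - h_).toNat
decreasing_by all_goals omega

-- ===== PORT B =====
-- Port of Source B's row(lo, hi, hd): the dict of game values for x in [lo, hi] at depth hd.
-- The 'ph ≤ hd' test (Source B tests 'hd == ph') is a totality guard: for hd > ph the Python
-- recurses forever (RecursionError), reachable only outside Pre_f.
def fRow (ph : Int) (lo hi hd : Int) : PySem.Dict Int Bool :=
  if ph ≤ hd then
    (PySem.List.pyRange lo (hi + 1) 1).foldl
      (fun m x => m.insert x (decide (x = 1))) PySem.Dict.empty
  else
    let prev := fRow ph (PySem.Int.floordiv lo 2) (PySem.Int.floordiv hi 2 + 2) (hd + 1)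
    (PySem.List.pyRange lo (hi + 1) 1).foldl
      (fun m x =>
        m.insert x
          (if x = 1 then decide (PySem.Int.mod hd 2 = PySem.Int.mod ph 2)
           else
             let c1 := prev.getD (PySem.Int.floordiv x 2 + 1) false
             let c2 := prev.getD (PySem.Int.floordiv x 2) false
             let c3 := prev.getD (PySem.Int.floordiv x 2 + 2) false
             if PySem.Int.mod (hd + 1) 2 = PySem.Int.mod ph 2 then c1 || c2 || c3
             else c1 && c2 && c3))
      PySem.Dict.empty
termination_by (ph - hd).toNat
decreasing_by all_goals omega

def f_alt (a : Int) (h_ : Int) (ph : Int) : Bool :=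
  if a = 1 then decide (PySem.Int.mod h_ 2 = PySem.Int.mod ph 2)
  else if h_ = ph then false
  else ((fRow ph a a h_).getD a false)   -- row(a, a, h)[a]; the key is always present on Pre_f

-- ===== PRECONDITION & SPEC =====
-- Pre_f excludes the inputs on which the Python A raises (RecursionError: a ≠ 1 and
-- h_ > ph makes the recursion run away from ph forever; B raises there too) and the
-- inputs with a ≠ 1 and h_ = ph, where A returns the int 0 instead of a bool (B returns False).
def Pre_f (a : Int) (h_ : Int) (ph : Int) : Prop := a = 1 ∨ h_ < ph
instance (a : Int) (h_ : Int) (ph : Int) : Decidable (Pre_f a h_ ph) := by unfold Pre_f; infer_instance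
def pvWitness_f : Int × Int × Int := (5, 0, 3)

def Spec_f (a : Int) (h_ : Int) (ph : Int) (out : Bool) : Prop := out = f_alt a h_ ph
instance (a : Int) (h_ : Int) (ph : Int) (out : Bool) : Decidable (Spec_f a h_ ph out) := by unfold Spec_f; infer_instance

-- ===== CLAIM (what is proved, stated in full; the proofs are below) =====
def Claim_equal_f : Prop := ∀ (a : Int) (h_ : Int) (ph : Int), Dom_f a h_ ph → Pre_f a h_ ph → Spec_f a h_ ph (f a h_ ph)

-- ===== LEMMAS AND PROOFS =====

-- folding insertions of (x, v x) over a range: lookup afterwards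
theorem fRow_foldl_get?_aux (v : Int → Bool) (y : Int) :
    ∀ (n : Nat) (lo b : Int), (b - lo).toNat = n →
    ∀ (m : PySem.Dict Int Bool),
    ((PySem.List.pyRange lo b 1).foldl (fun m x => m.insert x (v x)) m).get? y
      = if lo ≤ y ∧ y < b then some (v y) else m.get? y := by
  intro n
  induction n with
  | zero =>
    intro lo b hn m
    rw [PySem.List.pyRange_one_eq_nil (by omega)]
    simp only [List.foldl_nil]
    rw [if_neg (by omega)]
  | succ k ih =>
    intro lo b hn m
    rw [PySem.List.pyRange_one_cons (by omega)]
    simp only [List.foldl_cons]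
    rw [ih (lo + 1) b (by omega)]
    by_cases hy : y = lo
    · subst hy
      rw [if_neg (by omega), if_pos (by omega), PySem.Dict.get?_insert_self]
    · by_cases hin : lo + 1 ≤ y ∧ y < b
      · rw [if_pos hin, if_pos (by omega)]
      · rw [if_neg hin, if_neg (by omega), PySem.Dict.get?_insert]
        rw [if_neg hy]

theorem fRow_foldl_get? (v : Int → Bool) (lo b y : Int) (m : PySem.Dict Int Bool) :
    ((PySem.List.pyRange lo b 1).foldl (fun m x => m.insert x (v x)) m).get? y
      = if lo ≤ y ∧ y < b then some (v y) else m.get? y :=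
  fRow_foldl_get?_aux v y (b - lo).toNat lo b rfl m

theorem floordiv_two_mono {a b : Int} (h : a ≤ b) :
    PySem.Int.floordiv a 2 ≤ PySem.Int.floordiv b 2 := by
  rw [PySem.Int.floordiv_eq_ediv_of_pos (by norm_num),
      PySem.Int.floordiv_eq_ediv_of_pos (by norm_num)]
  exact Int.ediv_le_ediv (by norm_num) h

-- the main invariant: every entry of fRow is the value of A's recursion
theorem fRow_get?_aux (ph : Int) :
    ∀ (n : Nat) (lo hi hd x : Int), hd ≤ ph → (ph - hd).toNat = n →
    lo ≤ x → x ≤ hi →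
    (fRow ph lo hi hd).get? x = some (f x hd ph) := by
  intro n
  induction n with
  | zero =>
    intro lo hi hd x hle hn h1 h2
    have heq : hd = ph := by omega
    subst heq
    rw [fRow, if_pos le_rfl, fRow_foldl_get?, if_pos ⟨h1, by omega⟩]
    rw [f]
    by_cases hx : x = 1
    · simp [hx]
    · simp [hx]
  | succ k ih =>
    intro lo hi hd x hle hn h1 h2
    have hlt : hd < ph := by omega
    rw [fRow, if_neg (by omega), fRow_foldl_get?, if_pos ⟨h1, by omega⟩]
    rw [f]
    by_cases hx : x = 1
    · simp [hx]
    · have hne : x ≠ 1 := hx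
      have hne2 : hd ≠ ph := by omega
      simp only [hne, hne2, if_false, if_neg (show ¬ ph < hd by omega)]
      have hlo : PySem.Int.floordiv lo 2 ≤ PySem.Int.floordiv x 2 := floordiv_two_mono h1
      have hhi : PySem.Int.floordiv x 2 ≤ PySem.Int.floordiv hi 2 := floordiv_two_mono h2
      have e1 := ih (PySem.Int.floordiv lo 2) (PySem.Int.floordiv hi 2 + 2) (hd + 1)
        (PySem.Int.floordiv x 2 + 1) (by omega) (by omega) (by omega) (by omega)
      have e2 := ih (PySem.Int.floordiv lo 2) (PySem.Int.floordiv hi 2 + 2) (hd + 1)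
        (PySem.Int.floordiv x 2) (by omega) (by omega) (by omega) (by omega)
      have e3 := ih (PySem.Int.floordiv lo 2) (PySem.Int.floordiv hi 2 + 2) (hd + 1)
        (PySem.Int.floordiv x 2 + 2) (by omega) (by omega) (by omega) (by omega)
      simp only [PySem.Dict.getD_eq_get?_getD, e1, e2, e3, Option.getD_some]

theorem fRow_get? (ph lo hi hd x : Int) (hle : hd ≤ ph) (h1 : lo ≤ x) (h2 : x ≤ hi) :
    (fRow ph lo hi hd).get? x = some (f x hd ph) :=
  fRow_get?_aux ph (ph - hd).toNat lo hi hd x hle rfl h1 h2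

-- ===== VERDICT (by name: the statement is the Claim_ definition above) =====
theorem f_spec : Claim_equal_f := by
  intro a h_ ph _ hpre
  unfold Spec_f f_alt
  by_cases h1 : a = 1
  · rw [f]; simp [h1]
  · rcases hpre with h | hlt
    · exact absurd h h1
    · have h2 : h_ ≠ ph := by omega
      simp only [h1, h2, if_false]
      rw [PySem.Dict.getD_eq_get?_getD, fRow_get? ph a a h_ a (by omega) le_rfl le_rfl]
      rfl
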